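-- pv_equiv track=rewrite | github.com/Emerson-L/Q-less | utils.py | chars74k_sample_nums_to_characters
-- ===== SOURCE A (Python) =====
-- def chars74k_sample_nums_to_characters(nums: list[int]) -> list[str]:
--     """
--     Converts sample numbers from the Chars74k dataset into their respective characters
--
--     Parameters
--     ----------
--     nums: list of int
--         sample numbers to convert
--
--     Returns
--     -------
--     list of str
--         characters that correspond with the sample numbers
--     """
--     result = []
--     for n in nums:
--         if 1 <= n <= 10:
--             result.append(chr(n - 1 + ord('0')))
--         elif 11 <= n <= 36:
--             result.append(chr(n - 11 + ord('A')))
--         elif 37 <= n <= 62: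
--             result.append(chr(n - 37 + ord('a')))
--         else:
--             raise ValueError('Number out of range')
--     return result
-- ===== SOURCE B (Python) =====
-- import string
--
-- _TABLE = string.digits + string.ascii_uppercase + string.ascii_lowercase
--
-- def chars74k_sample_nums_to_characters(nums: list[int]) -> list[str]:
--     result = []
--     for n in nums:
--         if 1 <= n <= 62:
--             result.append(_TABLE[n - 1])
--         else:
--             raise ValueError('Number out of range')
--     return result
-- ===== Notes on version B (the rewrite author's own statement) =====
-- stated objective: simpler
-- what changed: Replaces the three arithmetic range branches (digit/upper/lower) with a single precomputed 62-character lookup table indexed by n-1.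
import Mathlib
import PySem

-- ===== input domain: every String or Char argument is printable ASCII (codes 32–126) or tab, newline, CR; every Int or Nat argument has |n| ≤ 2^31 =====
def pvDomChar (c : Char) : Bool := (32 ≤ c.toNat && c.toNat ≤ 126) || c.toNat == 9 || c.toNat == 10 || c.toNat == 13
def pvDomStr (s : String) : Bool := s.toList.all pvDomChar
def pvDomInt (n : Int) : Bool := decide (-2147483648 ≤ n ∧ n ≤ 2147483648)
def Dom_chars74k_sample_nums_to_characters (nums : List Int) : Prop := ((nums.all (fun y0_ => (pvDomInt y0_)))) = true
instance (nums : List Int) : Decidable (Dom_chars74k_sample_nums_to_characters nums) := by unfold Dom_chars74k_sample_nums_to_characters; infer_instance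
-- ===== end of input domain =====

-- B replaces A's three arithmetic range branches with one precomputed 62-char lookup table (simpler).
-- Pre_ excludes inputs containing a number outside 1..62, on which A (and B) raise ValueError.


-- ===== PORT A =====
-- literal port of A's loop: three range branches, chr(n-1+ord '0') etc.;
-- the 'raise ValueError' arm is excluded by Pre_ (the recursion just skips there, never reached under Pre_)
def chars74k_sample_nums_to_characters (nums : List Int) : List String :=
  match nums with
  | [] => []
  | n :: rest =>
    if 1 ≤ n ∧ n ≤ 10 then
      String.ofList [Char.ofNat (n - 1 + 48).toNat] :: chars74k_sample_nums_to_characters rest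
    else if 11 ≤ n ∧ n ≤ 36 then
      String.ofList [Char.ofNat (n - 11 + 65).toNat] :: chars74k_sample_nums_to_characters rest
    else if 37 ≤ n ∧ n ≤ 62 then
      String.ofList [Char.ofNat (n - 37 + 97).toNat] :: chars74k_sample_nums_to_characters rest
    else
      chars74k_sample_nums_to_characters rest  -- raise ValueError: outside Pre_

-- ===== PORT B =====
-- _TABLE = string.digits + string.ascii_uppercase + string.ascii_lowercase
def pvTable : List Char := "0123456789ABCDEFGHIJKLMNOPQRSTUVWXYZabcdefghijklmnopqrstuvwxyz".toList

def chars74k_sample_nums_to_characters_alt (nums : List Int) : List String :=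
  match nums with
  | [] => []
  | n :: rest =>
    if 1 ≤ n ∧ n ≤ 62 then
      (match PySem.List.pyGet? pvTable (n - 1) with
       | some c => String.ofList [c]
       | none => "") :: chars74k_sample_nums_to_characters_alt rest
    else
      chars74k_sample_nums_to_characters_alt rest  -- raise ValueError: outside Pre_

-- ===== PRECONDITION & SPEC =====
-- Pre_: every sample number is in 1..62; on any other number both Pythons raise ValueError.
def Pre_chars74k_sample_nums_to_characters (nums : List Int) : Prop :=
  ∀ n ∈ nums, 1 ≤ n ∧ n ≤ 62
instance (nums : List Int) : Decidable (Pre_chars74k_sample_nums_to_characters nums) := by unfold Pre_chars74k_sample_nums_to_characters; infer_instance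

def pvWitness_chars74k_sample_nums_to_characters : List Int := [1, 10, 11, 36, 37, 62]

def Spec_chars74k_sample_nums_to_characters (nums : List Int) (out : List String) : Prop := out = chars74k_sample_nums_to_characters_alt nums
instance (nums : List Int) (out : List String) : Decidable (Spec_chars74k_sample_nums_to_characters nums out) := by unfold Spec_chars74k_sample_nums_to_characters; infer_instance

-- ===== CLAIM (what is proved, stated in full; the proofs are below) =====
def Claim_equal_chars74k_sample_nums_to_characters : Prop := ∀ (nums : List Int), Dom_chars74k_sample_nums_to_characters nums → Pre_chars74k_sample_nums_to_characters nums → Spec_chars74k_sample_nums_to_characters nums (chars74k_sample_nums_to_characters nums)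

-- ===== LEMMAS AND PROOFS =====
-- on one in-range number, A's branch character equals B's table lookup
set_option maxHeartbeats 2000000 in
lemma elem_eq (n : Int) (h1 : 1 ≤ n) (h2 : n ≤ 62) :
    (if 1 ≤ n ∧ n ≤ 10 then String.ofList [Char.ofNat (n - 1 + 48).toNat]
     else if 11 ≤ n ∧ n ≤ 36 then String.ofList [Char.ofNat (n - 11 + 65).toNat]
     else String.ofList [Char.ofNat (n - 37 + 97).toNat])
    = (match PySem.List.pyGet? pvTable (n - 1) with
       | some c => String.ofList [c]
       | none => "") := by
  interval_cases n <;> decide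

-- ===== VERDICT (by name: the statement is the Claim_ definition above) =====
theorem chars74k_sample_nums_to_characters_spec : Claim_equal_chars74k_sample_nums_to_characters := by
  intro nums hdom hpre
  clear hdom
  unfold Spec_chars74k_sample_nums_to_characters
  induction nums with
  | nil => rfl
  | cons n rest ih =>
    obtain ⟨h1, h2⟩ := hpre n (List.mem_cons_self ..)
    have hrest := ih (fun m hm => hpre m (List.mem_cons_of_mem _ hm))
    have h62 : (1 ≤ n ∧ n ≤ 62) := ⟨h1, h2⟩
    simp only [chars74k_sample_nums_to_characters, chars74k_sample_nums_to_characters_alt,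
      if_pos h62]
    have he := elem_eq n h1 h2
    by_cases hd : 1 ≤ n ∧ n ≤ 10
    · simp only [if_pos hd] at he ⊢
      exact he ▸ hrest ▸ rfl
    · simp only [if_neg hd] at he ⊢
      by_cases hu : 11 ≤ n ∧ n ≤ 36
      · simp only [if_pos hu] at he ⊢
        exact he ▸ hrest ▸ rfl
      · have hl : 37 ≤ n ∧ n ≤ 62 := by omega
        simp only [if_neg hu, if_pos hl] at he ⊢
        exact he ▸ hrest ▸ rfl
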